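-- pv_equiv track=rewrite | github.com/tibbe78/Yatzy | yatzy.py | count_x_of_same_kind_score
-- ===== SOURCE A (Python) =====
-- from typing import List, Dict
--
-- def count_x_of_same_kind_score(dices: List[int], how_many: int):
--     dices.sort(reverse=True)
--     temp_score = 0
--     found = 0
--     for i, dice in enumerate(dices):
--         if i > len(dices)-how_many:
--             return 0
--         for x in range(how_many):
--             if dice == dices[i+x]:
--                 temp_score += dice
--                 found += 1
--             else:
--                 temp_score = 0
--                 found = 0
--                 break
--         if found == how_many:
--             return temp_score
--     return 0
-- ===== SOURCE B (Python) =====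
-- def count_x_of_same_kind_score(dices, how_many):
--     # Same in-place descending sort side effect as A; the return value is computed
--     # by a single run-length pass instead of A's nested consecutive-window re-scan.
--     dices.sort(reverse=True)
--     run_val = None
--     run_len = 0
--     for d in dices:
--         if run_val == d:
--             run_len += 1
--         else:
--             run_val = d
--             run_len = 1
--         if run_len == how_many:
--             return d * how_many
--     return 0
-- ===== Notes on version B (the rewrite author's own statement) =====
-- stated objective: alternative
-- what changed: Replaces A's nested scan (for each start index, re-check a how_many-long window of the sorted list, with temp_score/found accumulators) with a single pass over the sorted list maintaining a run-length counter, returning when a run reaches how_many.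
import Mathlib
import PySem

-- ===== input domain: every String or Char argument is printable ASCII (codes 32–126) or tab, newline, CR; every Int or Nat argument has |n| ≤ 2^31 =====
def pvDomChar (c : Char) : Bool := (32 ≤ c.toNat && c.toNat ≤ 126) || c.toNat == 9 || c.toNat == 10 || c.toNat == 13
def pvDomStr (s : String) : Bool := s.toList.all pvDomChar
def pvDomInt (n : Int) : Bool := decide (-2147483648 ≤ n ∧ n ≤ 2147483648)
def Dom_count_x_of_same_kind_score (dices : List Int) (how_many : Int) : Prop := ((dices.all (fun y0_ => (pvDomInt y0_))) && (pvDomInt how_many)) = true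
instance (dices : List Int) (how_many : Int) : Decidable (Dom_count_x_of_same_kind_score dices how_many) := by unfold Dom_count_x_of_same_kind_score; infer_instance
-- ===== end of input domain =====

-- B replaces A's nested consecutive-window re-scan of the sorted list by a single
-- run-length pass. Both Pythons sort `dices` in place (same side effect); the
-- equivalence proved here is about the return value.

-- ===== PORT A =====
-- inner `for x in range(how_many)` loop; `dices[i+x]` is in range whenever this line is
-- reached (otherwise the guard `i > len-how_many` returned 0 earlier), so the `.getD 0`
-- default of the exact pyGet? is never used.
def pvAInner (s : List Int) (dice i : Int) : List Int → Int → Int → Int × Int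
  | [], temp, found => (temp, found)
  | x :: xs, temp, found =>
      if dice = (PySem.List.pyGet? s (i + x)).getD 0 then
        pvAInner s dice i xs (temp + dice) (found + 1)
      else (0, 0)

-- outer `for i, dice in enumerate(dices)` loop, carrying temp_score and found
def pvAOuter (s : List Int) (k : Int) : List (Int × Int) → Int → Int → Int
  | [], _, _ => 0
  | (i, dice) :: rest, temp, found =>
      if i > (s.length : Int) - k then 0
      else
        let r := pvAInner s dice i (PySem.List.pyRange 0 k 1) temp found
        if r.2 = k then r.1 else pvAOuter s k rest r.1 r.2

def count_x_of_same_kind_score (dices : List Int) (how_many : Int) : Int :=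
  let s := PySem.List.sorted dices (fun x => x) true
  pvAOuter s how_many (PySem.List.enumerate s 0) 0 0

-- ===== PORT B =====
-- single pass with run state (run_val : Option Int, None initially; run_len)
def pvBLoop (k : Int) : List Int → Option Int → Int → Int
  | [], _, _ => 0
  | d :: rest, runVal, runLen =>
      let st : Option Int × Int :=
        if runVal = some d then (runVal, runLen + 1) else (some d, 1)
      if st.2 = k then d * k else pvBLoop k rest st.1 st.2

def count_x_of_same_kind_score_alt (dices : List Int) (how_many : Int) : Int :=
  let s := PySem.List.sorted dices (fun x => x) true
  pvBLoop how_many s none 0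

-- ===== PRECONDITION & SPEC =====
def Spec_count_x_of_same_kind_score (dices : List Int) (how_many : Int) (out : Int) : Prop := out = count_x_of_same_kind_score_alt dices how_many
instance (dices : List Int) (how_many : Int) (out : Int) : Decidable (Spec_count_x_of_same_kind_score dices how_many out) := by unfold Spec_count_x_of_same_kind_score; infer_instance

-- ===== CLAIM (what is proved, stated in full; the proofs are below) =====
def Claim_equal_count_x_of_same_kind_score : Prop := ∀ (dices : List Int) (how_many : Int), Dom_count_x_of_same_kind_score dices how_many → Spec_count_x_of_same_kind_score dices how_many (count_x_of_same_kind_score dices how_many)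

-- ===== LEMMAS AND PROOFS =====

-- reference: score of the first m-long run of equal consecutive elements, else 0
def pvR (m : Nat) : List Int → Int
  | [] => 0
  | d :: rest => if (d :: rest).take m = List.replicate m d then d * (m : Int) else pvR m rest

theorem pvR_cons (m : Nat) (d : Int) (rest : List Int) :
    pvR m (d :: rest) = if (d :: rest).take m = List.replicate m d then d * (m : Int) else pvR m rest := rfl

theorem pvR_short (m : Nat) : ∀ t : List Int, t.length < m → pvR m t = 0 := by
  intro t
  induction t with
  | nil => intro _; rfl
  | cons d rest ih =>
      intro h
      have hne : ((d :: rest).take m).length ≠ (List.replicate m d).length := by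
        simp only [List.length_take, List.length_replicate, List.length_cons]
        simp at h; omega
      simp only [pvR]
      rw [if_neg (fun he => hne (by rw [he]))]
      exact ih (by simp at h ⊢; omega)

theorem pvAInner_eq (s : List Int) (dice i : Int) :
    ∀ (r : List Int) (temp found : Int),
      pvAInner s dice i r temp found =
        if ∀ x ∈ r, dice = (PySem.List.pyGet? s (i + x)).getD 0 then
          (temp + dice * r.length, found + r.length)
        else (0, 0) := by
  intro r
  induction r with
  | nil => intro temp found; simp [pvAInner]
  | cons x xs ih =>
      intro temp found
      simp only [pvAInner]
      by_cases hx : dice = (PySem.List.pyGet? s (i + x)).getD 0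
      · rw [if_pos hx, ih]
        by_cases hall : ∀ y ∈ xs, dice = (PySem.List.pyGet? s (i + y)).getD 0
        · rw [if_pos hall, if_pos (by simpa [List.forall_mem_cons] using ⟨hx, hall⟩)]
          refine Prod.ext ?_ ?_ <;> · simp; ring
        · rw [if_neg hall, if_neg (by simp only [List.forall_mem_cons]; tauto)]
      · rw [if_neg hx, if_neg (by simp only [List.forall_mem_cons]; tauto)]

-- the all-window condition over range(m) at offset iN is a take/replicate equation
theorem pvWindow_iff (s : List Int) (iN m : Nat) (d : Int) (h : iN + m ≤ s.length) :
    ((∀ x ∈ PySem.List.pyRange 0 (m : Int) 1, d = (PySem.List.pyGet? s ((iN : Int) + x)).getD 0)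
      ↔ (s.drop iN).take m = List.replicate m d) := by
  rw [List.eq_replicate_iff]
  constructor
  · intro hall
    have hlen : ((s.drop iN).take m).length = m := by simp; omega
    refine ⟨hlen, ?_⟩
    intro b hb
    obtain ⟨j, hj, hjb⟩ := List.mem_iff_getElem.1 hb
    have hjm : j < m := by omega
    have hx : ((j : Int)) ∈ PySem.List.pyRange 0 (m : Int) 1 := by
      rw [PySem.List.mem_pyRange_one]
      exact ⟨by positivity, by exact_mod_cast hjm⟩
    have hv := hall _ hx
    have hidx : iN + j < s.length := by omega
    rw [show ((iN : Int) + (j : Int)) = ((iN + j : Nat) : Int) by push_cast; ring,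
        PySem.List.pyGet?_natCast, List.getElem?_eq_getElem hidx] at hv
    simp only [Option.getD_some] at hv
    rw [← hjb]
    simp only [List.getElem_take, List.getElem_drop]
    exact hv.symm
  · rintro ⟨hlen, hall⟩ x hx
    rw [PySem.List.mem_pyRange_one] at hx
    obtain ⟨hx0, hxm⟩ := hx
    obtain ⟨j, rfl⟩ := Int.eq_ofNat_of_zero_le hx0
    have hjm : j < m := by exact_mod_cast hxm
    have hidx : iN + j < s.length := by omega
    rw [show ((iN : Int) + (j : Int)) = ((iN + j : Nat) : Int) by push_cast; ring,
        PySem.List.pyGet?_natCast, List.getElem?_eq_getElem hidx]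
    have hb : s[iN + j] ∈ (s.drop iN).take m := by
      rw [List.mem_iff_getElem]
      refine ⟨j, by simp; omega, ?_⟩
      simp only [List.getElem_take, List.getElem_drop]
    simpa using (hall _ hb).symm

theorem pvAOuter_eq (s : List Int) (k : Int) (m : Nat) (hk : k = (m : Int)) (hm : 1 ≤ m) :
    ∀ (t : List Int) (iN : Nat), s.drop iN = t →
      pvAOuter s k (PySem.List.enumerate t (iN : Int)) 0 0 = pvR m t := by
  intro t
  induction t with
  | nil => intro iN _; simp [PySem.List.enumerate_nil, pvAOuter, pvR]
  | cons d rest ih =>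
      intro iN hdrop
      have hiN : iN < s.length := by
        by_contra hcon
        rw [List.drop_eq_nil_of_le (by omega)] at hdrop
        exact List.cons_ne_nil d rest hdrop.symm
      have hlen : rest.length = s.length - iN - 1 := by
        have := congrArg List.length hdrop
        simp at this; omega
      rw [PySem.List.enumerate_cons]
      simp only [pvAOuter]
      by_cases hg : (iN : Int) > (s.length : Int) - k
      · rw [if_pos hg]
        rw [pvR_short m (d :: rest) (by simp [hlen]; subst hk; omega)]
      · rw [if_neg hg]
        have hwin : iN + m ≤ s.length := by subst hk; omega
        rw [pvAInner_eq]
        have hrlen : ((PySem.List.pyRange 0 k 1).length : Int) = k := by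
          rw [PySem.List.length_pyRange_one]; subst hk; simp
        by_cases hc : ∀ x ∈ PySem.List.pyRange 0 k 1,
            d = (PySem.List.pyGet? s ((iN : Int) + x)).getD 0
        · rw [if_pos hc]
          have htake : (d :: rest).take m = List.replicate m d := by
            rw [← hdrop, ← pvWindow_iff s iN m d hwin]
            rw [hk] at hc; exact hc
          simp only [hrlen]
          rw [if_pos (by ring : (0 : Int) + k = k)]
          rw [pvR_cons, if_pos htake]
          subst hk; ring
        · rw [if_neg hc]
          rw [if_neg (show ¬ ((0 : Int), (0 : Int)).2 = k by simp; subst hk; exact_mod_cast by omega)]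
          have hdrop' : s.drop (iN + 1) = rest := by
            rw [← List.tail_drop, hdrop, List.tail_cons]
          have hrec := ih (iN + 1) hdrop'
          rw [show ((iN : Int) + 1) = ((iN + 1 : Nat) : Int) by omega, hrec]
          rw [pvR_cons, if_neg ?_]
          intro htake
          apply hc
          rw [hk]
          exact (pvWindow_iff s iN m d hwin).2 (by rw [hdrop]; exact htake)

-- B-side: the run state (some v, len) behaves like len copies of v prepended
theorem pvR_skip (m : Nat) (v d : Int) (hne : d ≠ v) (rest : List Int) :
    ∀ len : Nat, len < m →
      pvR m (List.replicate len v ++ d :: rest) = pvR m (d :: rest) := by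
  intro len
  induction len with
  | zero => intro _; rfl
  | succ n ih =>
      intro hlt
      rw [List.replicate_succ, List.cons_append]
      rw [pvR_cons, if_neg ?_, ih (by omega)]
      intro heq
      rw [show m = (m - 1) + 1 by omega] at heq
      rw [List.take_succ_cons, List.replicate_succ] at heq
      have heq2 : (List.replicate n v ++ d :: rest).take (m - 1) = List.replicate (m - 1) v := by
        injection heq
      have h1 := congrArg (fun l => l[n]?) heq2
      simp only at h1
      rw [List.getElem?_take, if_pos (by omega : n < m - 1)] at h1
      rw [List.getElem?_append_right (by simp)] at h1
      simp only [List.length_replicate, Nat.sub_self, List.getElem?_cons_zero,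
        List.getElem?_replicate, if_pos (by omega : n < m - 1)] at h1
      exact hne (by injection h1)

theorem pvBLoop_inv (k : Int) (m : Nat) (hk : k = (m : Int)) :
    ∀ (t : List Int) (v : Int) (len : Nat), 1 ≤ len → len < m →
      pvBLoop k t (some v) (len : Int) = pvR m (List.replicate len v ++ t) := by
  intro t
  induction t with
  | nil =>
      intro v len h1 hlt
      rw [pvR_short m _ (by simp; omega)]
      rfl
  | cons d rest ih =>
      intro v len h1 hlt
      simp only [pvBLoop]
      by_cases hv : d = v
      · subst hv
        rw [if_pos rfl]
        simp only
        have hlist : List.replicate len d ++ d :: rest = List.replicate (len + 1) d ++ rest := by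
          rw [List.replicate_succ', List.append_assoc]; rfl
        rw [hlist]
        by_cases hdone : len + 1 = m
        · rw [if_pos (by subst hk; exact_mod_cast by omega)]
          rw [hdone]
          have hhead : List.replicate m d ++ rest = d :: (List.replicate (m - 1) d ++ rest) := by
            conv_lhs => rw [show m = (m - 1) + 1 by omega, List.replicate_succ, List.cons_append]
          rw [hhead]
          simp only [pvR]
          rw [if_pos ?_, hk]
          rw [← List.cons_append, ← List.replicate_succ, show m - 1 + 1 = m by omega]
          rw [List.take_append_of_le_length (by simp), List.take_replicate]
          simp []
        · rw [if_neg (by subst hk; exact_mod_cast by omega)]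
          have := ih d (len + 1) (by omega) (by omega)
          rw [show ((len : Int) + 1) = ((len + 1 : Nat) : Int) by push_cast; ring]
          exact this
      · have hcond : ¬ ((some v : Option Int) = some d) := by
          simp only [Option.some.injEq]
          exact fun h => hv h.symm
        rw [if_neg hcond]
        simp only
        rw [if_neg (show ¬ (1 : Int) = k by subst hk; exact_mod_cast by omega)]
        rw [pvR_skip m v d hv rest len hlt]
        have := ih d 1 le_rfl (by omega)
        simpa using this

theorem pvBLoop_top (k : Int) (m : Nat) (hk : k = (m : Int)) (hm : 1 ≤ m) :
    ∀ s : List Int, pvBLoop k s none 0 = pvR m s := by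
  intro s
  cases s with
  | nil => rfl
  | cons d rest =>
      simp only [pvBLoop]
      rw [if_neg (show ¬ (none : Option Int) = some d by simp)]
      change (if (1 : Int) = k then d * k else pvBLoop k rest (some d) 1) = pvR m (d :: rest)
      by_cases hone : m = 1
      · rw [if_pos (show (1 : Int) = k by subst hk; rw [hone]; rfl)]
        subst hk; rw [hone]
        rw [pvR_cons, if_pos (by simp)]
      · rw [if_neg (show ¬ (1 : Int) = k by subst hk; exact_mod_cast by omega)]
        have := pvBLoop_inv k m hk rest d 1 le_rfl (by omega)
        simpa using this

-- how_many ≤ 0: both sides return 0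
theorem pvAOuter_nonpos (s : List Int) (k : Int) (hk : k ≤ 0) :
    ∀ pairs : List (Int × Int), pvAOuter s k pairs 0 0 = 0 := by
  intro pairs
  induction pairs with
  | nil => rfl
  | cons p rest ih =>
      obtain ⟨i, dice⟩ := p
      simp only [pvAOuter]
      by_cases hg : i > (s.length : Int) - k
      · rw [if_pos hg]
      · rw [if_neg hg, PySem.List.pyRange_one_eq_nil (by omega)]
        simp only [pvAInner]
        by_cases h0 : (0 : Int) = k
        · rw [if_pos h0]
        · rw [if_neg h0]; exact ih

theorem pvBLoop_nonpos (k : Int) (hk : k ≤ 0) :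
    ∀ (t : List Int) (v : Option Int) (len : Int), 0 ≤ len → pvBLoop k t v len = 0 := by
  intro t
  induction t with
  | nil => intro v len _; rfl
  | cons d rest ih =>
      intro v len hlen
      simp only [pvBLoop]
      by_cases hv : v = some d
      · rw [if_pos hv, if_neg (by simp; omega)]
        exact ih _ _ (by omega)
      · rw [if_neg hv, if_neg (by simp; omega)]
        exact ih _ _ (by omega)

-- ===== VERDICT (by name: the statement is the Claim_ definition above) =====
theorem count_x_of_same_kind_score_spec : Claim_equal_count_x_of_same_kind_score := by
  intro dices how_many _
  unfold Spec_count_x_of_same_kind_score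
  unfold count_x_of_same_kind_score count_x_of_same_kind_score_alt
  simp only
  set s := PySem.List.sorted dices (fun x => x) true with hs
  by_cases hk : how_many ≤ 0
  · rw [pvAOuter_nonpos s how_many hk, pvBLoop_nonpos how_many hk s none 0 le_rfl]
  · set m : Nat := how_many.toNat with hm
    have hkm : how_many = (m : Int) := by omega
    have hm1 : 1 ≤ m := by omega
    rw [pvBLoop_top how_many m hkm hm1 s]
    have := pvAOuter_eq s how_many m hkm hm1 s 0 (by simp)
    simpa using this
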